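-- pv_equiv track=rewrite | github.com/alexcg1/godel_escher_bach | .ipynb_checkpoints/page_395-checkpoint.py | is_tortoise
-- ===== SOURCE A (Python) =====
-- def is_prime(n):
--     if n == 1:
--         return False
--     # if divisible only by itself and one return True
--     countdown = n
--
--     for divisor in range(1, n):
--         blacklist = [1, n]
--         if countdown not in blacklist:
--             remainder = n % countdown
--             if remainder == 0:
--                 return False
--
--         countdown -= 1
--     return True
--
-- def get_primes(limit):
--     primes = []
--     while limit > 0:
--         if is_prime(limit):
--             primes.append(limit)
--         limit -= 1
--     primes.reverse()
--     return primes
--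
-- def is_tortoise(n):
--     # Is even number a sum of 2 primes?
--     if n % 2 == 0:
--         list1 = get_primes(n)
--         list2 = list1.copy()
--         for i in list1:
--             for j in list2:
--                 if i + j == n:
--                     return True
--     return False
-- ===== SOURCE B (Python) =====
-- def _is_prime(m):
--     if m < 2:
--         return False
--     d = 2
--     while d * d <= m:
--         if m % d == 0:
--             return False
--         d += 1
--     return True
--
-- def is_tortoise(n):
--     # Is even number a sum of 2 primes?
--     if n % 2 != 0:
--         return False
--     half = n // 2
--     p = 2
--     while p <= half:
--         if _is_prime(p) and _is_prime(n - p):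
--             return True
--         p += 1
--     return False
-- ===== Notes on version B (the rewrite author's own statement) =====
-- stated objective: alternative
-- what changed: Instead of building the full list of primes up to n (linear trial division per number) and scanning all pairs, B makes a single pass over candidate summands up to half of n and tests each candidate and its complement for primality by trial division up to the square root, returning at the first hit.
import Mathlib
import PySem

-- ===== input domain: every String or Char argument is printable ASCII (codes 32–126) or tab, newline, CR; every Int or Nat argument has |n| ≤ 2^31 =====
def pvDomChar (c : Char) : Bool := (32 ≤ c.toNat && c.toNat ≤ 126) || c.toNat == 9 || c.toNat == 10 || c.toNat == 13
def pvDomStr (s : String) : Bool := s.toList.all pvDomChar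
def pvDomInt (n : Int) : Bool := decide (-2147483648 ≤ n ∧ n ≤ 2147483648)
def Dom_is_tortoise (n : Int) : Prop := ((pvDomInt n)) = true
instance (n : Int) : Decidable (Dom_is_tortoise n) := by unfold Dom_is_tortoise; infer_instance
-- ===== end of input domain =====

-- B replaces A's full prime list (linear trial division per number, then a pair scan)
-- by a single pass p = 2 .. n//2 testing p and n-p with trial division up to the
-- square root (a different algorithm of different shape; no speed claim is made).

-- ===== PORT A =====
-- for divisor in range(1, n): with state `countdown`; blacklist = [1, n]
def isPrimeLoop (n : Int) : List Int → Int → Bool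
  | [], _ => true
  | _ :: rest, countdown =>
    if ¬ (countdown = 1 ∨ countdown = n) then
      if PySem.Int.mod n countdown = 0 then false
      else isPrimeLoop n rest (countdown - 1)
    else isPrimeLoop n rest (countdown - 1)

def is_prime (n : Int) : Bool :=
  if n = 1 then false
  else isPrimeLoop n (PySem.List.pyRange 1 n 1) n

-- while limit > 0: append if prime, decrement; then reverse
def getPrimesLoop (limit : Int) (primes : List Int) : List Int :=
  if 0 < limit then
    getPrimesLoop (limit - 1) (if is_prime limit then primes ++ [limit] else primes)
  else primes
termination_by limit.toNat
decreasing_by omega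

def get_primes (limit : Int) : List Int :=
  (getPrimesLoop limit []).reverse

def is_tortoise (n : Int) : Bool :=
  if PySem.Int.mod n 2 = 0 then
    let list1 := get_primes n
    let list2 := list1            -- list2 = list1.copy()
    list1.any (fun i => list2.any (fun j => i + j == n))  -- nested for with early return True
  else false

-- ===== PORT B =====
-- while d * d <= m: trial division up to the square root
def altPrimeLoop (m d : Int) : Bool :=
  if h : d * d ≤ m then
    if PySem.Int.mod m d = 0 then false else altPrimeLoop m (d + 1)
  else true
termination_by (m + 1 - d).toNat
decreasing_by
  have hm : (0:Int) ≤ m := le_trans (mul_self_nonneg d) h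
  have hdm : d ≤ m := by
    by_cases hd : d ≤ 0
    · omega
    · have : d * 1 ≤ d * d := by
        apply mul_le_mul_of_nonneg_left (by omega) (by omega)
      omega
  omega

def altIsPrime (m : Int) : Bool :=
  if m < 2 then false else altPrimeLoop m 2

-- while p <= half:
def altLoop (n p : Int) : Bool :=
  if h : p ≤ PySem.Int.floordiv n 2 then
    if altIsPrime p && altIsPrime (n - p) then true else altLoop n (p + 1)
  else false
termination_by (PySem.Int.floordiv n 2 + 1 - p).toNat
decreasing_by omega

def is_tortoise_alt (n : Int) : Bool :=
  if PySem.Int.mod n 2 ≠ 0 then false else altLoop n 2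

-- ===== PRECONDITION & SPEC =====
def Spec_is_tortoise (n : Int) (out : Bool) : Prop := out = is_tortoise_alt n
instance (n : Int) (out : Bool) : Decidable (Spec_is_tortoise n out) := by unfold Spec_is_tortoise; infer_instance

-- ===== CLAIM (what is proved, stated in full; the proofs are below) =====
def Claim_equal_is_tortoise : Prop := ∀ (n : Int), Dom_is_tortoise n → Spec_is_tortoise n (is_tortoise n)

-- ===== LEMMAS AND PROOFS =====

-- the mathematical predicate both primality tests decide (on m ≥ 1)
def IsP (m : Int) : Prop := 2 ≤ m ∧ ∀ d : Int, 2 ≤ d → d < m → ¬ d ∣ m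

lemma isPrimeLoop_iff (n : Int) (l : List Int) (c : Int) :
    isPrimeLoop n l c = true ↔
      ∀ j : Nat, j < l.length → (c - j ≠ 1 ∧ c - j ≠ n) → PySem.Int.mod n (c - j) ≠ 0 := by
  induction l generalizing c with
  | nil => simp [isPrimeLoop]
  | cons x rest ih =>
    have key : (∀ j : Nat, j < rest.length → ((c-1) - j ≠ 1 ∧ (c-1) - j ≠ n) → PySem.Int.mod n ((c-1) - j) ≠ 0)
        ↔ (∀ j : Nat, 0 < j → j < rest.length + 1 → (c - j ≠ 1 ∧ c - j ≠ n) → PySem.Int.mod n (c - j) ≠ 0) := by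
      constructor
      · intro h j hj0 hjl hne
        have := h (j - 1) (by omega)
        have hc : (c - 1) - ((j:Int) - 1) = c - j := by ring
        have hcast : ((j - 1 : Nat) : Int) = (j : Int) - 1 := by omega
        rw [hcast, hc] at this
        exact this hne
      · intro h j hj hne
        have := h (j + 1) (by omega) (by omega)
        have hcast : ((j + 1 : Nat) : Int) = (j : Int) + 1 := by push_cast; ring
        rw [hcast] at this
        have hc : c - ((j:Int) + 1) = (c - 1) - j := by ring
        rw [hc] at this
        exact this hne
    by_cases hb : c = 1 ∨ c = n
    · rw [show isPrimeLoop n (x :: rest) c = isPrimeLoop n rest (c - 1) by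
        simp [isPrimeLoop, hb]]
      rw [ih, key]
      constructor
      · intro h j hjl hne
        have hj0 : 0 < j := by
          rcases Nat.eq_zero_or_pos j with h0 | h0
          · subst h0; simp at hne; omega
          · exact h0
        exact h j hj0 (by simpa using hjl) hne
      · intro h j _ hjl hne; exact h j (by simpa using hjl) hne
    · rw [show isPrimeLoop n (x :: rest) c =
        (if PySem.Int.mod n c = 0 then false else isPrimeLoop n rest (c - 1)) by
        simp [isPrimeLoop, hb]]
      by_cases hm : PySem.Int.mod n c = 0
      · simp only [hm]
        constructor
        · intro h; exact absurd h (by simp)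
        · intro h
          exfalso
          have := h 0 (by simp) (by push_cast; omega)
          simp at this; omega
      · rw [if_neg hm, ih, key]
        constructor
        · intro h j hjl hne
          rcases Nat.eq_zero_or_pos j with h0 | h0
          · subst h0; simpa using hm
          · exact h j h0 (by simpa using hjl) hne
        · intro h j hj0 hjl hne; exact h j hjl hne

lemma is_prime_iff (m : Int) (hm : 1 ≤ m) : is_prime m = true ↔ IsP m := by
  by_cases h1 : m = 1
  · subst h1
    simp [is_prime, IsP]
  · have hm2 : 2 ≤ m := by omega
    rw [is_prime, if_neg h1, isPrimeLoop_iff, IsP]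
    simp only [PySem.List.length_pyRange_one]
    constructor
    · intro h
      refine ⟨hm2, fun d hd hdm hdvd => ?_⟩
      have hj : ((m - d).toNat : Int) = m - d := by omega
      have := h (m - d).toNat (by omega) (by rw [hj]; constructor <;> omega)
      rw [hj] at this
      rw [show m - (m - d) = d by ring] at this
      exact this ((PySem.Int.mod_eq_zero_iff_dvd m d).mpr hdvd)
    · intro h j hjl hne hmod
      have hd2 : 2 ≤ m - j := by omega
      have hdm : m - j < m := by omega
      exact h.2 (m - j) hd2 hdm ((PySem.Int.mod_eq_zero_iff_dvd m (m - j)).mp hmod)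

lemma altPrimeLoop_iff (m d : Int) :
    1 ≤ d → (altPrimeLoop m d = true ↔
      ∀ e : Int, d ≤ e → e * e ≤ m → PySem.Int.mod m e ≠ 0) := by
  fun_induction altPrimeLoop m d with
  | case1 d hle hmod =>
    intro hd
    simp only [Bool.false_eq_true, false_iff]
    intro h
    exact h d le_rfl hle hmod
  | case2 d hle hmod ih =>
    intro hd
    rw [ih (by omega)]
    constructor
    · intro h e he hee
      rcases eq_or_lt_of_le he with rfl | hlt
      · exact hmod
      · exact h e (by omega) hee
    · intro h e he hee
      exact h e (by omega) hee
  | case3 d hle =>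
    intro hd
    simp only [true_iff]
    intro e he hee hmod
    have : d * d ≤ e * e := by
      apply mul_le_mul he he (by omega) (by omega)
    omega

lemma altIsPrime_iff (m : Int) : altIsPrime m = true ↔ IsP m := by
  unfold altIsPrime IsP
  by_cases h2 : m < 2
  · simp [h2]
  · rw [if_neg h2, altPrimeLoop_iff m 2 (by omega)]
    have h2' : 2 ≤ m := by omega
    simp only [h2', true_and]
    constructor
    · intro h d hd hdm hdvd
      rcases hdvd with ⟨c, hc⟩
      have hd0 : 0 < d := by omega
      have hc0 : 0 < c := by nlinarith
      have hc2 : 2 ≤ c := by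
        by_contra hcc
        have : c = 1 := by omega
        subst this
        omega
      have hkey : d * d ≤ m ∨ c * c ≤ m := by
        by_cases hk : d * d ≤ m
        · exact Or.inl hk
        · right
          have hdd : m < d * d := not_le.mp hk
          nlinarith
      rcases hkey with hk | hk
      · exact h d hd hk (by rw [PySem.Int.mod_eq_zero_iff_dvd]; exact ⟨c, hc⟩)
      · exact h c hc2 hk (by rw [PySem.Int.mod_eq_zero_iff_dvd]; exact ⟨d, by linarith [hc]⟩)
    · intro h e he hee hmod
      have hem : e < m := by nlinarith
      exact h e he hem ((PySem.Int.mod_eq_zero_iff_dvd m e).mp hmod)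

lemma mem_getPrimesLoop (limit : Int) (acc : List Int) (x : Int) :
    x ∈ getPrimesLoop limit acc ↔ x ∈ acc ∨ (1 ≤ x ∧ x ≤ limit ∧ is_prime x = true) := by
  fun_induction getPrimesLoop limit acc with
  | case1 limit acc hpos ih =>
    by_cases hp : is_prime limit = true
    · simp only [hp, if_true, dite_true] at ih ⊢
      rw [ih]
      simp only [List.mem_append, List.mem_singleton]
      constructor
      · rintro ((hx | rfl) | hx)
        · exact Or.inl hx
        · exact Or.inr ⟨by omega, le_rfl, hp⟩
        · exact Or.inr ⟨hx.1, by omega, hx.2.2⟩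
      · rintro (hx | ⟨h1, h2, h3⟩)
        · exact Or.inl (Or.inl hx)
        · rcases eq_or_lt_of_le h2 with rfl | hlt
          · exact Or.inl (Or.inr rfl)
          · exact Or.inr ⟨h1, by omega, h3⟩
    · simp only [hp, Bool.false_eq_true, dite_false, ite_false] at ih ⊢
      rw [ih]
      constructor
      · rintro (hx | hx)
        · exact Or.inl hx
        · exact Or.inr ⟨hx.1, by omega, hx.2.2⟩
      · rintro (hx | ⟨h1, h2, h3⟩)
        · exact Or.inl hx
        · rcases eq_or_lt_of_le h2 with rfl | hlt
          · exact absurd h3 hp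
          · exact Or.inr ⟨h1, by omega, h3⟩
  | case2 limit acc hpos =>
    simp only [iff_self_or]
    intro h
    omega

lemma mem_get_primes (n x : Int) :
    x ∈ get_primes n ↔ 1 ≤ x ∧ x ≤ n ∧ is_prime x = true := by
  rw [get_primes, List.mem_reverse, mem_getPrimesLoop]
  simp

lemma altLoop_iff (n p : Int) :
    altLoop n p = true ↔
      ∃ q : Int, p ≤ q ∧ q ≤ PySem.Int.floordiv n 2 ∧
        altIsPrime q = true ∧ altIsPrime (n - q) = true := by
  fun_induction altLoop n p with
  | case1 p hle hpq =>
    simp only [true_iff]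
    rw [Bool.and_eq_true] at hpq
    exact ⟨p, le_rfl, hle, hpq.1, hpq.2⟩
  | case2 p hle hpq ih =>
    rw [Bool.and_eq_true] at hpq
    rw [ih]
    constructor
    · rintro ⟨q, h1, h2, h3, h4⟩
      exact ⟨q, by omega, h2, h3, h4⟩
    · rintro ⟨q, h1, h2, h3, h4⟩
      rcases eq_or_lt_of_le h1 with rfl | hlt
      · exact absurd (And.intro h3 h4) (by simpa using hpq)
      · exact ⟨q, by omega, h2, h3, h4⟩
  | case3 p hle =>
    simp only [Bool.false_eq_true, false_iff]
    rintro ⟨q, h1, h2, _, _⟩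
    omega

lemma tortoise_eq (n : Int) : is_tortoise n = is_tortoise_alt n := by
  rw [is_tortoise, is_tortoise_alt]
  by_cases hpar : PySem.Int.mod n 2 = 0
  · rw [if_pos hpar, if_neg (by simpa using hpar)]
    rw [Bool.eq_iff_iff]
    simp only [List.any_eq_true, beq_iff_eq, mem_get_primes, altLoop_iff]
    constructor
    · rintro ⟨i, ⟨hi1, hin, hip⟩, j, ⟨hj1, hjn, hjp⟩, hij⟩
      have hIi : IsP i := (is_prime_iff i hi1).mp hip
      have hIj : IsP j := (is_prime_iff j hj1).mp hjp
      have h2i : 2 ≤ i := hIi.1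
      have h2j : 2 ≤ j := hIj.1
      rcases le_total i j with hle | hle
      · refine ⟨i, h2i, ?_, (altIsPrime_iff i).mpr hIi, ?_⟩
        · rw [PySem.Int.le_floordiv_iff_mul_le (by omega)]; omega
        · rw [show n - i = j by omega]; exact (altIsPrime_iff j).mpr hIj
      · refine ⟨j, h2j, ?_, (altIsPrime_iff j).mpr hIj, ?_⟩
        · rw [PySem.Int.le_floordiv_iff_mul_le (by omega)]; omega
        · rw [show n - j = i by omega]; exact (altIsPrime_iff i).mpr hIi
    · rintro ⟨q, h2q, hqh, hq, hnq⟩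
      have hIq : IsP q := (altIsPrime_iff q).mp hq
      have hInq : IsP (n - q) := (altIsPrime_iff (n - q)).mp hnq
      have h2nq : 2 ≤ n - q := hInq.1
      have hqn : q * 2 ≤ n := by
        rw [← PySem.Int.le_floordiv_iff_mul_le (by omega)]; exact hqh
      refine ⟨q, ⟨by omega, by omega, (is_prime_iff q (by omega)).mpr hIq⟩,
              n - q, ⟨by omega, by omega, (is_prime_iff (n - q) (by omega)).mpr hInq⟩, by ring⟩
  · rw [if_neg hpar, if_pos (by simpa using hpar)]

-- ===== VERDICT (by name: the statement is the Claim_ definition above) =====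
theorem is_tortoise_spec : Claim_equal_is_tortoise := by
  intro n _
  unfold Spec_is_tortoise
  exact tortoise_eq n
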